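-- pv_equiv track=rewrite | github.com/TBIAPBC/APBC2024 | A2/funkwalter-Administration.py | find_partitions
-- ===== SOURCE A (Python) =====
-- def find_partitions(capitals, all_pairs, cost_matrix, cost_limit, current_pairs=[], index=0, current_cost=0):
--     if len(current_pairs) == len(capitals) // 2:
--         if current_cost <= cost_limit:
--             return [(current_cost, current_pairs.copy())]
--         else:
--             return []
--     if index >= len(all_pairs):
--         return []
--     results = []
--     next_pair = all_pairs[index]
--     cap1, cap2 = next_pair
--     pair_cost = cost_matrix[capitals.index(cap1)][capitals.index(cap2)]
--     used_capitals = []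
--     for pair in current_pairs:
--         for cap in pair:
--             used_capitals.append(cap)
--     if cap1 not in used_capitals and cap2 not in used_capitals:
--         current_pairs.append(next_pair)
--         results.extend(find_partitions(
--             capitals, all_pairs, cost_matrix, cost_limit,
--             current_pairs, index + 1, current_cost + pair_cost))
--         current_pairs.pop()
--     results.extend(
--         find_partitions(capitals, all_pairs, cost_matrix, cost_limit, current_pairs, index + 1, current_cost))
--     return results
-- ===== SOURCE B (Python) =====
-- def find_partitions(capitals, all_pairs, cost_matrix, cost_limit, current_pairs=[], index=0, current_cost=0):
--     target = len(capitals) // 2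
--     pos = {}
--     for i, c in enumerate(capitals):
--         if c not in pos:
--             pos[c] = i
--     results = []
--     stack = [(index, tuple(current_pairs), current_cost)]
--     while stack:
--         i, pairs, cost = stack.pop()
--         if len(pairs) == target:
--             if cost <= cost_limit:
--                 results.append((cost, list(pairs)))
--             continue
--         if i >= len(all_pairs):
--             continue
--         c1, c2 = all_pairs[i]
--         pair_cost = cost_matrix[pos[c1]][pos[c2]]
--         stack.append((i + 1, pairs, cost))
--         used = {c for p in pairs for c in p}
--         if c1 not in used and c2 not in used:
--             stack.append((i + 1, pairs + ((c1, c2),), cost + pair_cost))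
--     return results
-- ===== Notes on version B (the rewrite author's own statement) =====
-- stated objective: alternative
-- what changed: Replaces the recursive backtracking (with in-place append/pop on current_pairs and two capitals.index scans per node) by an iterative DFS over an explicit stack of immutable (index, pairs, cost) states with a capital-to-index dictionary precomputed once, producing the results in the same take-before-skip order.
import Mathlib
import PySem

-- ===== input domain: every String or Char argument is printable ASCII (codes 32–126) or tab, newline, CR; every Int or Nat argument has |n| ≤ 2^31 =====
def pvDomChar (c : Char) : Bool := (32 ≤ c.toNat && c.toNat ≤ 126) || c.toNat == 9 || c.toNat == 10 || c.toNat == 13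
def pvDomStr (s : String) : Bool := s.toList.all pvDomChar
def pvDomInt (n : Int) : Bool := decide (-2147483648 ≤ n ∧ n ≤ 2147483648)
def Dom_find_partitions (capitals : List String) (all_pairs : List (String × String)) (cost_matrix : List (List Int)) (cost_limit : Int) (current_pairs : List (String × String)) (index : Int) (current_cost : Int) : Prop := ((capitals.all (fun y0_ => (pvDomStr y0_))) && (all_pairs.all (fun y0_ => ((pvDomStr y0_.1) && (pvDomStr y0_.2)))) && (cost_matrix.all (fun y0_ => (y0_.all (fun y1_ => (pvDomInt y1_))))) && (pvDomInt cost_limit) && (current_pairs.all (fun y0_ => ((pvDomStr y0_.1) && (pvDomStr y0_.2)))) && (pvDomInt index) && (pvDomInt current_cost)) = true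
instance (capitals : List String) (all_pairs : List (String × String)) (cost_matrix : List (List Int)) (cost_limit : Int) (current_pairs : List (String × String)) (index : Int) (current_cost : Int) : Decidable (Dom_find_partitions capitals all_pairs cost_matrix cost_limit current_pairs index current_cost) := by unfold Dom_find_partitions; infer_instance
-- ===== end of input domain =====

-- B replaces A's recursion by an iterative DFS over an explicit stack and a precomputed
-- capital→index dictionary (objective: alternative decomposition, same results in the same order).
-- A mutates current_pairs only temporarily (append then pop); its net effect on the argument is nil.

-- ===== PORT A =====
def find_partitions (capitals : List String) (all_pairs : List (String × String)) (cost_matrix : List (List Int)) (cost_limit : Int) (current_pairs : List (String × String)) (index : Int) (current_cost : Int) : List (Int × (List (String × String))) :=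
  if current_pairs.length = capitals.length / 2 then
    if current_cost ≤ cost_limit then [(current_cost, current_pairs)] else []
  else if (all_pairs.length : Int) ≤ index then []
  else
    match PySem.List.pyGet? all_pairs index with
    | none => []   -- IndexError (index < -len): excluded by Pre_
    | some (c1, c2) =>
      match PySem.List.index? capitals c1 with
      | none => []   -- ValueError: excluded by Pre_
      | some i1 =>
        match PySem.List.index? capitals c2 with
        | none => []   -- ValueError: excluded by Pre_
        | some i2 =>
          match PySem.List.pyGet? cost_matrix (i1 : Int) with
          | none => []   -- IndexError: excluded by Pre_
          | some row =>
            match PySem.List.pyGet? row (i2 : Int) with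
            | none => []   -- IndexError: excluded by Pre_
            | some pair_cost =>
              let used_capitals := current_pairs.foldl (fun acc p => acc ++ [p.1, p.2]) ([] : List String)
              let take :=
                if ¬ used_capitals.contains c1 = true ∧ ¬ used_capitals.contains c2 = true then
                  find_partitions capitals all_pairs cost_matrix cost_limit (current_pairs ++ [(c1, c2)]) (index + 1) (current_cost + pair_cost)
                else []
              take ++ find_partitions capitals all_pairs cost_matrix cost_limit current_pairs (index + 1) current_cost
termination_by (((all_pairs.length : Int) + 1 - index)).toNat
decreasing_by all_goals omega

-- ===== PORT B =====
-- weight bound for the stack loop (used only for termination)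
theorem pv_wt_lt (len i : Int) (h : i < len) :
    3 ^ ((len + 1 - (i + 1)).toNat) + 3 ^ ((len + 1 - (i + 1)).toNat) < 3 ^ ((len + 1 - i).toNat) := by
  have hk : (len + 1 - i).toNat = (len + 1 - (i + 1)).toNat + 1 := by omega
  rw [hk, pow_succ]
  have hpos : 0 < 3 ^ ((len + 1 - (i + 1)).toNat) := pow_pos (by norm_num) _
  omega

-- the while-stack loop of Source B: head of the list is the top of the stack
def bLoop (all_pairs : List (String × String)) (cost_matrix : List (List Int)) (cost_limit : Int) (target : Nat) (pos : PySem.Dict String Int) : List (Int × List (String × String) × Int) → List (Int × (List (String × String))) → List (Int × (List (String × String)))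
  | [], results => results
  | (i, pairs, cost) :: rest, results =>
    if pairs.length = target then
      bLoop all_pairs cost_matrix cost_limit target pos rest (if cost ≤ cost_limit then results ++ [(cost, pairs)] else results)
    else if (all_pairs.length : Int) ≤ i then
      bLoop all_pairs cost_matrix cost_limit target pos rest results
    else
      match PySem.List.pyGet? all_pairs i with
      | none => bLoop all_pairs cost_matrix cost_limit target pos rest results   -- IndexError in Source B: outside Pre_
      | some (c1, c2) =>
        match pos.get? c1, pos.get? c2 with
        | some i1, some i2 =>
          match PySem.List.pyGet? cost_matrix i1 with
          | none => bLoop all_pairs cost_matrix cost_limit target pos rest results   -- IndexError: outside Pre_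
          | some row =>
            match PySem.List.pyGet? row i2 with
            | none => bLoop all_pairs cost_matrix cost_limit target pos rest results   -- IndexError: outside Pre_
            | some pair_cost =>
              let used : PySem.Set String := PySem.Set.ofList (pairs.flatMap (fun p => [p.1, p.2]))
              let stack' :=
                (if ¬ PySem.Set.contains used c1 = true ∧ ¬ PySem.Set.contains used c2 = true then
                  [(i + 1, pairs ++ [(c1, c2)], cost + pair_cost)]
                else []) ++ (i + 1, pairs, cost) :: rest
              bLoop all_pairs cost_matrix cost_limit target pos stack' results
        | _, _ => bLoop all_pairs cost_matrix cost_limit target pos rest results   -- KeyError in Source B: outside Pre_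
termination_by stack _ => (stack.map (fun s => 3 ^ (((all_pairs.length : Int) + 1 - s.1).toNat))).sum
decreasing_by
  all_goals first
  | (simp only [List.map_cons, List.sum_cons]
     have hp : 0 < 3 ^ (((all_pairs.length : Int) + 1 - i).toNat) := pow_pos (by norm_num) _
     omega)
  | (simp only [List.map_cons, List.sum_cons, List.map_append, List.sum_append]
     have h1 := pv_wt_lt (all_pairs.length : Int) i (by omega)
     have hp : 0 < 3 ^ (((all_pairs.length : Int) + 1 - (i + 1)).toNat) := pow_pos (by norm_num) _
     split <;> simp only [List.map_cons, List.sum_cons, List.map_nil, List.sum_nil] <;> omega)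

def find_partitions_alt (capitals : List String) (all_pairs : List (String × String)) (cost_matrix : List (List Int)) (cost_limit : Int) (current_pairs : List (String × String)) (index : Int) (current_cost : Int) : List (Int × (List (String × String))) :=
  let target := capitals.length / 2
  let pos := (PySem.List.enumerate capitals 0).foldl (fun d ic => if d.contains ic.2 then d else d.insert ic.2 ic.1) PySem.Dict.empty
  bLoop all_pairs cost_matrix cost_limit target pos [(index, current_pairs, current_cost)] []

-- ===== PRECONDITION & SPEC =====
-- both capitals of the pair occur in capitals and the corresponding cost_matrix entry exists
def pvPairOK (capitals : List String) (cost_matrix : List (List Int)) (p : String × String) : Bool :=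
  match PySem.List.index? capitals p.1, PySem.List.index? capitals p.2 with
  | some i1, some i2 =>
    match PySem.List.pyGet? cost_matrix (i1 : Int) with
    | some row => (PySem.List.pyGet? row (i2 : Int)).isSome
    | none => false
  | _, _ => false

-- Pre_ holds exactly where the Python A returns: either it returns immediately (matching done, or
-- index past the end), or index ≥ -len and every pair position the recursion reaches (the suffix from
-- index, or all of them after a negative-index wrap) names two known capitals with a cost_matrix entry
-- in range — otherwise A raises ValueError/IndexError.
def Pre_find_partitions (capitals : List String) (all_pairs : List (String × String)) (cost_matrix : List (List Int)) (cost_limit : Int) (current_pairs : List (String × String)) (index : Int) (current_cost : Int) : Prop :=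
  current_pairs.length = capitals.length / 2
  ∨ (all_pairs.length : Int) ≤ index
  ∨ (-(all_pairs.length : Int) ≤ index ∧ ∀ i : Fin all_pairs.length, (index ≤ (i.1 : Int) ∨ index < 0) → pvPairOK capitals cost_matrix all_pairs[i.1] = true)
instance (capitals : List String) (all_pairs : List (String × String)) (cost_matrix : List (List Int)) (cost_limit : Int) (current_pairs : List (String × String)) (index : Int) (current_cost : Int) : Decidable (Pre_find_partitions capitals all_pairs cost_matrix cost_limit current_pairs index current_cost) := by unfold Pre_find_partitions; infer_instance

def pvWitness_find_partitions : List String × (List (String × String)) × List (List Int) × Int × (List (String × String)) × Int × Int :=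
  (["a", "b", "c", "d"], [("a", "b"), ("c", "d"), ("a", "c")], [[0, 1, 2, 3], [1, 0, 4, 5], [2, 4, 0, 6], [3, 5, 6, 0]], 10, [], 0, 0)

def Spec_find_partitions (capitals : List String) (all_pairs : List (String × String)) (cost_matrix : List (List Int)) (cost_limit : Int) (current_pairs : List (String × String)) (index : Int) (current_cost : Int) (out : List (Int × (List (String × String)))) : Prop := out = find_partitions_alt capitals all_pairs cost_matrix cost_limit current_pairs index current_cost
instance (capitals : List String) (all_pairs : List (String × String)) (cost_matrix : List (List Int)) (cost_limit : Int) (current_pairs : List (String × String)) (index : Int) (current_cost : Int) (out : List (Int × (List (String × String)))) : Decidable (Spec_find_partitions capitals all_pairs cost_matrix cost_limit current_pairs index current_cost out) := by unfold Spec_find_partitions; infer_instance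

-- ===== CLAIM (what is proved, stated in full; the proofs are below) =====
def Claim_equal_find_partitions : Prop := ∀ (capitals : List String) (all_pairs : List (String × String)) (cost_matrix : List (List Int)) (cost_limit : Int) (current_pairs : List (String × String)) (index : Int) (current_cost : Int), Dom_find_partitions capitals all_pairs cost_matrix cost_limit current_pairs index current_cost → Pre_find_partitions capitals all_pairs cost_matrix cost_limit current_pairs index current_cost → Spec_find_partitions capitals all_pairs cost_matrix cost_limit current_pairs index current_cost (find_partitions capitals all_pairs cost_matrix cost_limit current_pairs index current_cost)

-- ===== LEMMAS AND PROOFS =====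

theorem pv_pos_get_aux (c : String) : ∀ (l : List String) (s : Int) (d : PySem.Dict String Int),
    ((PySem.List.enumerate l s).foldl (fun d ic => if d.contains ic.2 then d else d.insert ic.2 ic.1) d).get? c
      = (d.get? c).or ((PySem.List.index? l c).map (fun n : Nat => s + (n : Int))) := by
  intro l
  induction l with
  | nil =>
    intro s d
    simp [PySem.List.enumerate_nil, PySem.List.index?_eq_idxOf?]
  | cons x xs ih =>
    intro s d
    rw [PySem.List.enumerate_cons]
    simp only [List.foldl_cons]
    rw [ih]
    by_cases hxc : x = c
    · subst hxc
      rw [PySem.List.index?_cons_self]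
      by_cases hcont : d.contains x = true
      · rw [if_pos hcont]
        rw [PySem.Dict.contains_eq_isSome_get?] at hcont
        obtain ⟨v, hv⟩ := Option.isSome_iff_exists.mp hcont
        rw [hv]
        simp [Option.or]
      · rw [if_neg hcont]
        have hnone : d.get? x = none := by
          rw [PySem.Dict.contains_eq_isSome_get?] at hcont
          exact Option.not_isSome_iff_eq_none.mp (by simp_all)
        rw [hnone, PySem.Dict.get?_insert_self]
        simp [Option.or]
    · rw [PySem.List.index?_cons_of_ne xs hxc]
      have hd' : (if d.contains x = true then d else d.insert x s).get? c = d.get? c := by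
        split
        · rfl
        · exact PySem.Dict.get?_insert_of_ne d s (fun h => hxc h.symm)
      rw [hd']
      cases h : PySem.List.index? xs c with
      | none => simp
      | some k =>
        simp only [Option.map_some]
        have he : (s + 1) + (k : Int) = s + (((k + 1 : Nat)) : Int) := by push_cast; ring
        rw [he]

theorem pv_pos_get (capitals : List String) (c : String) :
    ((PySem.List.enumerate capitals 0).foldl (fun d ic => if d.contains ic.2 then d else d.insert ic.2 ic.1) PySem.Dict.empty).get? c
      = (PySem.List.index? capitals c).map (fun n : Nat => (n : Int)) := by
  rw [pv_pos_get_aux]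
  simp [PySem.Dict.get?_empty]

theorem pv_used_eq (pairs : List (String × String)) (x : String) :
    PySem.Set.contains (PySem.Set.ofList (pairs.flatMap (fun p => [p.1, p.2]))) x
      = (pairs.foldl (fun acc p => acc ++ [p.1, p.2]) ([] : List String)).contains x := by
  rw [PySem.List.foldl_append_eq_flatMap]
  simp [PySem.Set.contains_eq_listContains]

theorem pv_key (capitals : List String) (all_pairs : List (String × String)) (cost_matrix : List (List Int)) (cost_limit : Int) :
    ∀ (n : Nat) (i : Int) (pairs : List (String × String)) (cost : Int) (rest : List (Int × List (String × String) × Int)) (results : List (Int × (List (String × String)))),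
      (((all_pairs.length : Int) + 1 - i)).toNat ≤ n →
      bLoop all_pairs cost_matrix cost_limit (capitals.length / 2)
        ((PySem.List.enumerate capitals 0).foldl (fun d ic => if d.contains ic.2 then d else d.insert ic.2 ic.1) PySem.Dict.empty)
        ((i, pairs, cost) :: rest) results
      = bLoop all_pairs cost_matrix cost_limit (capitals.length / 2)
        ((PySem.List.enumerate capitals 0).foldl (fun d ic => if d.contains ic.2 then d else d.insert ic.2 ic.1) PySem.Dict.empty)
        rest (results ++ find_partitions capitals all_pairs cost_matrix cost_limit pairs i cost) := by
  intro n
  induction n with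
  | zero =>
    intro i pairs cost rest results hn
    have hidx : (all_pairs.length : Int) ≤ i := by omega
    rw [bLoop, find_partitions]
    by_cases hlen : pairs.length = capitals.length / 2
    · rw [if_pos hlen, if_pos hlen]
      by_cases hc : cost ≤ cost_limit
      · rw [if_pos hc, if_pos hc]
      · rw [if_neg hc, if_neg hc, List.append_nil]
    · rw [if_neg hlen, if_neg hlen, if_pos hidx, if_pos hidx, List.append_nil]
  | succ m ih =>
    intro i pairs cost rest results hn
    rw [bLoop, find_partitions]
    by_cases hlen : pairs.length = capitals.length / 2
    · rw [if_pos hlen, if_pos hlen]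
      by_cases hc : cost ≤ cost_limit
      · rw [if_pos hc, if_pos hc]
      · rw [if_neg hc, if_neg hc, List.append_nil]
    · rw [if_neg hlen, if_neg hlen]
      by_cases hidx : (all_pairs.length : Int) ≤ i
      · rw [if_pos hidx, if_pos hidx, List.append_nil]
      · rw [if_neg hidx, if_neg hidx]
        have hih : (((all_pairs.length : Int) + 1 - (i + 1))).toNat ≤ m := by omega
        cases hget : PySem.List.pyGet? all_pairs i with
        | none => rw [List.append_nil]
        | some p =>
          obtain ⟨c1, c2⟩ := p
          simp only []
          rw [pv_pos_get capitals c1, pv_pos_get capitals c2]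
          cases h1 : PySem.List.index? capitals c1 with
          | none => simp only [Option.map_none]; rw [List.append_nil]
          | some i1 =>
            simp only [Option.map_some]
            cases h2 : PySem.List.index? capitals c2 with
            | none => simp only [Option.map_none]; rw [List.append_nil]
            | some i2 =>
              simp only [Option.map_some]
              cases hrow : PySem.List.pyGet? cost_matrix (i1 : Int) with
              | none => simp only []; rw [List.append_nil]
              | some row =>
                simp only []
                cases hpc : PySem.List.pyGet? row (i2 : Int) with
                | none => simp only []; rw [List.append_nil]
                | some pair_cost =>
                  simp only []
                  rw [pv_used_eq pairs c1, pv_used_eq pairs c2]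
                  by_cases hfree : ¬ (pairs.foldl (fun acc p => acc ++ [p.1, p.2]) ([] : List String)).contains c1 = true ∧ ¬ (pairs.foldl (fun acc p => acc ++ [p.1, p.2]) ([] : List String)).contains c2 = true
                  · rw [if_pos hfree, if_pos hfree]
                    rw [List.singleton_append]
                    rw [ih (i + 1) (pairs ++ [(c1, c2)]) (cost + pair_cost) _ results hih]
                    rw [ih (i + 1) pairs cost rest _ hih]
                    rw [List.append_assoc]
                  · rw [if_neg hfree, if_neg hfree, List.nil_append, List.nil_append]
                    rw [ih (i + 1) pairs cost rest _ hih]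

-- ===== VERDICT (by name: the statement is the Claim_ definition above) =====
theorem find_partitions_spec : Claim_equal_find_partitions := by
  intro capitals all_pairs cost_matrix cost_limit current_pairs index current_cost _ _
  unfold Spec_find_partitions find_partitions_alt
  rw [pv_key capitals all_pairs cost_matrix cost_limit (((all_pairs.length : Int) + 1 - index)).toNat index current_pairs current_cost [] [] le_rfl]
  simp [bLoop]
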